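-- pv_equiv track=rewrite | github.com/jmunsell1195/Registrar-Data-Project | Original Files/1344734 - Introductory Physics Student - Copy-20211024T174607Z-001/1344734 - Introductory Physics Student - Copy/features.py | duplicate
-- ===== SOURCE A (Python) =====
-- def duplicate(lst):
--     duplicates = {}
--     dup_list = [(lst[i],i) for i in range(len(lst)) if lst.count(lst[i]) > 1]
--     dup_item = [dup_list[i][0] for i in range(len(dup_list))]
--     dup_item = list(set(dup_item))
--     dup_item.sort()
--     for item in dup_item:
--         ind = []
--         for i in range(len(dup_list)):
--             if item == dup_list[i][0]:
--                 ind.append(dup_list[i][1])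
--         if item not in duplicates.keys():
--             duplicates[item] = ind
--     return duplicates
-- ===== SOURCE B (Python) =====
-- def duplicate(lst):
--     pos = {}
--     for i, x in enumerate(lst):
--         pos.setdefault(x, []).append(i)
--     return {v: pos[v] for v in sorted(pos) if len(pos[v]) > 1}
-- ===== Notes on version B (the rewrite author's own statement) =====
-- stated objective: faster
-- what changed: Replaces the quadratic count()-filtered comprehension plus per-value rescans with a single grouping pass that records each value's index list, then one sort of the distinct keys and a filter on group size.
import Mathlib
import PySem

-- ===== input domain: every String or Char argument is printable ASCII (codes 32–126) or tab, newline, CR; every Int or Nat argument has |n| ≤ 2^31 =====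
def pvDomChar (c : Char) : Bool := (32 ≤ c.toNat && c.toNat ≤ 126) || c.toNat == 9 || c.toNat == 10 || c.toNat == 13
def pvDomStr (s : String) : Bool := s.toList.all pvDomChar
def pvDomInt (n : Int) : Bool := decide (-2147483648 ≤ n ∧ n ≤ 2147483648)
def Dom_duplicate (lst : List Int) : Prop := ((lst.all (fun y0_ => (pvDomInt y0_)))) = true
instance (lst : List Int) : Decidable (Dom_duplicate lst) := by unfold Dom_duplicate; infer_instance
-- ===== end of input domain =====

-- B groups indices by value in one pass, then sorts only the distinct keys; A rescans the list per value.

-- ===== PORT A =====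
def duplicate (lst : List Int) : List (Int × List Int) :=
  -- dup_list = [(lst[i],i) for i in range(len(lst)) if lst.count(lst[i]) > 1]
  let dup_list : List (Int × Int) :=
    ((PySem.List.pyRange 0 (lst.length : Int) 1).filter
      (fun i => lst.count (PySem.List.pyGetD lst i 0) > 1)).map
      (fun i => (PySem.List.pyGetD lst i 0, i))
  -- dup_item = [dup_list[i][0] for i in range(len(dup_list))]
  let dup_item : List Int :=
    (PySem.List.pyRange 0 (dup_list.length : Int) 1).map
      (fun i => (PySem.List.pyGetD dup_list i (0, 0)).1)
  -- dup_item = list(set(dup_item)); dup_item.sort()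
  let dup_item := PySem.List.sorted (PySem.Set.ofList dup_item) (fun x => x) false
  -- for item in dup_item: … ;  return duplicates
  (dup_item.foldl
    (fun (duplicates : PySem.Dict Int (List Int)) item =>
      let ind : List Int :=
        (PySem.List.pyRange 0 (dup_list.length : Int) 1).foldl
          (fun ind i =>
            if item == (PySem.List.pyGetD dup_list i (0, 0)).1 then
              ind ++ [(PySem.List.pyGetD dup_list i (0, 0)).2]
            else ind)
          []
      if duplicates.contains item then duplicates else duplicates.insert item ind)
    PySem.Dict.empty).items

-- ===== PORT B =====
def duplicate_alt (lst : List Int) : List (Int × List Int) :=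
  -- pos = {}; for i, x in enumerate(lst): pos.setdefault(x, []).append(i)
  let pos : PySem.Dict Int (List Int) :=
    (PySem.List.enumerate lst 0).foldl
      (fun d p => d.modify p.2 [] (· ++ [p.1])) PySem.Dict.empty
  -- return {v: pos[v] for v in sorted(pos) if len(pos[v]) > 1}
  (((PySem.List.sorted pos.keys (fun v => v) false).filter
      (fun v => (pos.getD v []).length > 1)).foldl
    (fun (d : PySem.Dict Int (List Int)) v => d.insert v (pos.getD v []))
    PySem.Dict.empty).items

-- ===== PRECONDITION & SPEC =====
def Spec_duplicate (lst : List Int) (out : List (Int × List Int)) : Prop := out = duplicate_alt lst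
instance (lst : List Int) (out : List (Int × List Int)) : Decidable (Spec_duplicate lst out) := by unfold Spec_duplicate; infer_instance

-- ===== CLAIM (what is proved, stated in full; the proofs are below) =====
def Claim_equal_duplicate : Prop := ∀ (lst : List Int), Dom_duplicate lst → Spec_duplicate lst (duplicate lst)

-- ===== LEMMAS AND PROOFS =====

-- swapped enumerate: the (value, index) pairs of lst
def pvE (lst : List Int) : List (Int × Int) :=
  (PySem.List.enumerate lst 0).map (fun p => (p.2, p.1))

-- A's dup_list
def pvDupList (lst : List Int) : List (Int × Int) :=
  ((PySem.List.pyRange 0 (lst.length : Int) 1).filter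
    (fun i => lst.count (PySem.List.pyGetD lst i 0) > 1)).map
    (fun i => (PySem.List.pyGetD lst i 0, i))

-- B's pos dict
def pvPos (lst : List Int) : PySem.Dict Int (List Int) :=
  (PySem.List.enumerate lst 0).foldl
    (fun d p => d.modify p.2 [] (· ++ [p.1])) PySem.Dict.empty

-- common normal form of both results
def pvN (lst : List Int) : List (Int × List Int) :=
  ((PySem.List.sorted (PySem.Set.ofList lst) (fun x => x) false).filter
    (fun v => 1 < lst.count v)).map (fun v => (v, (pvPos lst).getD v []))

lemma pvE_map_fst (lst : List Int) : (pvE lst).map (·.1) = lst := by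
  simp [pvE, List.map_map, Function.comp_def, PySem.List.map_snd_enumerate]

lemma pvDupList_eq (lst : List Int) :
    pvDupList lst = (pvE lst).filter (fun p => 1 < lst.count p.1) := by
  rw [pvE, PySem.List.enumerate_eq_map_pyRange (d := 0), List.map_map]
  rw [List.filter_map]
  simp [pvDupList, Function.comp_def]

lemma pvPos_getD (lst : List Int) (v : Int) :
    (pvPos lst).getD v [] = ((pvE lst).filter (fun p => p.1 == v)).map (·.2) := by
  have h : pvPos lst = (pvE lst).foldl (fun d p => d.modify p.1 [] (· ++ [p.2])) PySem.Dict.empty := by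
    rw [pvE, List.foldl_map]; rfl
  rw [h, PySem.Dict.getD_foldl_modify_append, PySem.Dict.getD_empty]
  simp

lemma pvPos_keys (lst : List Int) : (pvPos lst).keys = PySem.Set.ofList lst := by
  rw [pvPos, PySem.Dict.keys_foldl_modify_key]
  simp [PySem.Dict.keys_empty, PySem.List.map_snd_enumerate]
  rfl

lemma pvPos_len (lst : List Int) (v : Int) :
    ((pvPos lst).getD v []).length = lst.count v := by
  rw [pvPos_getD, List.length_map, ← List.countP_eq_length_filter]
  have h : List.count v lst = List.countP (fun p => p.1 == v) (pvE lst) := by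
    conv_lhs => rw [← pvE_map_fst lst]
    rw [List.count, List.countP_map]
    rfl
  rw [h]

lemma pvInd_eq (lst : List Int) (v : Int) (h : 1 < lst.count v) :
    ((pvDupList lst).filter (fun p => v == p.1)).map (·.2) = (pvPos lst).getD v [] := by
  rw [pvDupList_eq, pvPos_getD, List.filter_filter]
  congr 1
  apply List.filter_congr
  intro p _
  by_cases hp : p.1 = v
  · subst hp
    simp [decide_eq_true h]
  · have h1 : (p.1 == v) = false := by simpa using hp
    have h2 : (v == p.1) = false := by simpa using Ne.symm hp
    rw [h1, h2, Bool.false_and]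

lemma pvMemDupFst (lst : List Int) (a : Int) :
    a ∈ (pvDupList lst).map (·.1) ↔ a ∈ lst ∧ 1 < lst.count a := by
  rw [pvDupList_eq]
  constructor
  · intro h
    obtain ⟨p, hp, rfl⟩ := List.mem_map.mp h
    obtain ⟨hpE, hpc⟩ := List.mem_filter.mp hp
    have : p.1 ∈ (pvE lst).map (·.1) := List.mem_map_of_mem hpE
    rw [pvE_map_fst] at this
    exact ⟨this, by simpa using hpc⟩
  · rintro ⟨ha, hc⟩
    have ha' : a ∈ (pvE lst).map (·.1) := by rw [pvE_map_fst]; exact ha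
    obtain ⟨p, hpE, rfl⟩ := List.mem_map.mp ha'
    exact List.mem_map_of_mem (List.mem_filter.mpr ⟨hpE, by simpa using hc⟩)

lemma pvKeys_eq (lst : List Int) :
    PySem.List.sorted (PySem.Set.ofList ((pvDupList lst).map (·.1))) (fun x => x) false
      = (PySem.List.sorted (PySem.Set.ofList lst) (fun x => x) false).filter
          (fun v => 1 < lst.count v) := by
  have hpair : ((PySem.List.sorted (PySem.Set.ofList lst) (fun x => x) false).filter
      (fun v => 1 < lst.count v)).Pairwise (· < ·) :=
    (PySem.List.sorted_ofList_pairwise_lt (xs := lst)).filter _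
  refine PySem.List.sorted_eq_of_perm_of_pairwise_lt _ _ (fun x => x) ?_ hpair
  apply (List.perm_ext_iff_of_nodup (hpair.imp ne_of_lt) (PySem.Set.nodup_ofList _)).mpr
  intro a
  simp only [List.mem_filter, PySem.List.mem_sorted, PySem.Set.mem_ofList, pvMemDupFst,
    decide_eq_true_eq]

lemma pvGuardedFold (f : Int → List Int) :
    ∀ (l : List Int) (d : PySem.Dict Int (List Int)), l.Nodup →
      (∀ v ∈ l, d.contains v = false) →
      (l.foldl (fun acc v => if acc.contains v then acc else acc.insert v (f v)) d).items
        = d.items ++ l.map (fun v => (v, f v))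
  | [], d, _, _ => by simp
  | x :: t, d, hn, hd => by
    have hx : d.contains x = false := hd x (List.mem_cons_self)
    have hrec := pvGuardedFold f t (d.insert x (f x)) (List.Nodup.of_cons hn)
      (fun v hv => by
        rw [PySem.Dict.contains_insert]
        have hne : v ≠ x := fun h => (List.nodup_cons.mp hn).1 (h ▸ hv)
        simp [hne, hd v (List.mem_cons_of_mem x hv)])
    simp only [List.foldl_cons, hx, Bool.false_eq_true, if_false]
    rw [hrec, PySem.Dict.items_insert_of_not_contains d (f x) hx]
    simp
lemma pvAlt_eq (lst : List Int) : duplicate_alt lst = pvN lst := by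
  show ((((PySem.List.sorted (pvPos lst).keys (fun v => v) false).filter
      (fun v => ((pvPos lst).getD v []).length > 1)).foldl
    (fun (d : PySem.Dict Int (List Int)) v => d.insert v ((pvPos lst).getD v []))
    PySem.Dict.empty).items) = pvN lst
  have hnodup : (((PySem.List.sorted (pvPos lst).keys (fun v => v) false).filter
      (fun v => ((pvPos lst).getD v []).length > 1)).map (fun a => a)).Nodup := by
    rw [List.map_id']
    refine List.Nodup.filter _ ?_
    rw [(PySem.List.sorted_perm (pvPos lst).keys (fun v => v) false).nodup_iff, pvPos_keys]
    exact PySem.Set.nodup_ofList _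
  rw [PySem.Dict.items_foldl_insert_fresh _ (fun a => a) (fun a => (pvPos lst).getD a [])
    PySem.Dict.empty (fun a _ => PySem.Dict.contains_empty a) hnodup]
  simp [pvPos_keys, pvPos_len, pvN, PySem.Dict.empty]

lemma pvA_eq (lst : List Int) : duplicate lst = pvN lst := by
  show (((PySem.List.sorted (PySem.Set.ofList
      ((PySem.List.pyRange 0 ((pvDupList lst).length : Int) 1).map
        (fun i => (PySem.List.pyGetD (pvDupList lst) i (0, 0)).1))) (fun x => x) false).foldl
    (fun (duplicates : PySem.Dict Int (List Int)) item =>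
      if duplicates.contains item then duplicates
      else duplicates.insert item
        ((PySem.List.pyRange 0 ((pvDupList lst).length : Int) 1).foldl
          (fun ind i =>
            if item == (PySem.List.pyGetD (pvDupList lst) i (0, 0)).1 then
              ind ++ [(PySem.List.pyGetD (pvDupList lst) i (0, 0)).2]
            else ind)
          []))
    PySem.Dict.empty).items) = pvN lst
  have hmap : ∀ (xs : List (Int × Int)), (PySem.List.pyRange 0 (xs.length : Int) 1).map
      (fun i => (PySem.List.pyGetD xs i (0, 0)).1) = xs.map (·.1) := by
    intro xs
    rw [show (fun i => (PySem.List.pyGetD xs i ((0 : Int), (0 : Int))).1)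
        = ((fun (p : Int × Int) => p.1) ∘ (fun i => PySem.List.pyGetD xs i (0, 0))) from rfl,
      ← List.map_map, PySem.List.map_pyGetD_pyRange_zero' xs (0, 0)]
  rw [hmap (pvDupList lst)]
  rw [pvGuardedFold _ _ PySem.Dict.empty
    (by rw [(PySem.List.sorted_perm _ _ _).nodup_iff]; exact PySem.Set.nodup_ofList _)
    (fun v _ => PySem.Dict.contains_empty v)]
  rw [pvKeys_eq]
  show [] ++ _ = _
  rw [List.nil_append, pvN]
  apply List.map_congr_left
  intro v hv
  have hc : 1 < lst.count v := by
    have := (List.mem_filter.mp hv).2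
    simpa using this
  rw [PySem.List.foldl_pyRange_zero_pyGetD' (pvDupList lst) (0, 0)
    (fun acc p => if v == p.1 then acc ++ [p.2] else acc) []]
  rw [PySem.List.foldl_append_if (fun p => v == p.1) (fun p => p.2) (pvDupList lst) []]
  rw [List.nil_append, pvInd_eq lst v hc]

-- ===== VERDICT (by name: the statement is the Claim_ definition above) =====
theorem duplicate_spec : Claim_equal_duplicate := by
  intro lst _
  unfold Spec_duplicate
  rw [pvA_eq, pvAlt_eq]
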